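-- pv_equiv track=rewrite | github.com/jedi0605/python_leetcode | src/HappyNumber.py | numToSquares
-- ===== SOURCE A (Python) =====
-- def numToSquares(n: int) -> int:
--     output = 0
--     while n > 0:
--         digit = n % 10
--         digit = digit**2
--         output += digit
--         n = n // 10
--     return output
-- ===== SOURCE B (Python) =====
-- def numToSquares(n: int) -> int:
--     if n <= 0:
--         return 0
--     return sum(int(c) ** 2 for c in str(n))
-- ===== Notes on version B (the rewrite author's own statement) =====
-- stated objective: idiomatic
-- what changed: B extracts the digits from the decimal string representation (sum of int(c)**2 over str(n)) instead of A's repeated %10 / //10 stripping loop.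
import Mathlib
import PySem

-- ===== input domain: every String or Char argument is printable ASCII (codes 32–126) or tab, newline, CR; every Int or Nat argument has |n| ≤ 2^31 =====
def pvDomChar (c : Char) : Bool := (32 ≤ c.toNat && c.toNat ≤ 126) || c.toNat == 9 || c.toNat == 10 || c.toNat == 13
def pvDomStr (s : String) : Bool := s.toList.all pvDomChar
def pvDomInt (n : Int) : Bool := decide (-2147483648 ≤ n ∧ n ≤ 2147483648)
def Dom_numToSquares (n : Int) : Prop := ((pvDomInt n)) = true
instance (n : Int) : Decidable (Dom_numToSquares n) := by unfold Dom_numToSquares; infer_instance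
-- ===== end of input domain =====

-- B computes the digits from the decimal string representation instead of A's %10 // 10 loop (idiomatic; return value only, no side effects).

-- ===== PORT A =====
-- the while loop of A, state (n, output)
def numToSquaresLoop (n output : Int) : Int :=
  if 0 < n then
    numToSquaresLoop (PySem.Int.floordiv n 10) (output + (PySem.Int.mod n 10) ^ 2)
  else output
termination_by n.toNat
decreasing_by
  rename_i h
  simp only [PySem.Int.floordiv, Int.fdiv_eq_ediv, show ((0:Int) ≤ 10 ∨ (10:Int) ∣ n) from Or.inl (by omega), if_true]
  omega

def numToSquares (n : Int) : Int := numToSquaresLoop n 0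

-- ===== PORT B =====
-- int(c)**2; the .getD 0 is unreachable: str(n) for n > 0 consists of decimal digits only
def sqDigit (c : Char) : Int := ((PySem.Int.ofChars? [c]).getD 0) ^ 2

def numToSquares_alt (n : Int) : Int :=
  if n ≤ 0 then 0
  else ((PySem.Int.toStr n).toList.map sqDigit).sum

-- ===== PRECONDITION & SPEC =====
def Spec_numToSquares (n : Int) (out : Int) : Prop := out = numToSquares_alt n
instance (n : Int) (out : Int) : Decidable (Spec_numToSquares n out) := by unfold Spec_numToSquares; infer_instance

-- ===== CLAIM (what is proved, stated in full; the proofs are below) =====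
def Claim_equal_numToSquares : Prop := ∀ (n : Int), Dom_numToSquares n → Spec_numToSquares n (numToSquares n)

-- ===== LEMMAS AND PROOFS =====

/-- sum of squares of the decimal digits of a natural number (0 for 0) -/
def digitSq (m : Nat) : Int :=
  ((m % 10 : Nat) : Int) ^ 2 + (if h : m / 10 = 0 then 0 else digitSq (m / 10))
termination_by m
decreasing_by omega

theorem digitSq_eq (m : Nat) : digitSq m = ((m % 10 : Nat) : Int) ^ 2 + digitSq (m / 10) := by
  rw [digitSq]
  by_cases h : m / 10 = 0
  · rw [h]; simp [digitSq]
  · simp [h]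

theorem sqDigit_digitChar (d : Nat) (h : d < 10) :
    sqDigit (Nat.digitChar d) = (d : Int) ^ 2 := by
  interval_cases d <;> decide

theorem toDigitsCore_sum (fuel : Nat) : ∀ (m : Nat) (ds : List Char), m < fuel →
    ((Nat.toDigitsCore 10 fuel m ds).map sqDigit).sum = digitSq m + (ds.map sqDigit).sum := by
  induction fuel with
  | zero => intro m ds h; omega
  | succ fuel ih =>
    intro m ds h
    rw [Nat.toDigitsCore]
    by_cases h10 : m / 10 = 0
    · simp only [h10, if_true]
      rw [digitSq_eq m, h10]
      simp [sqDigit_digitChar (m % 10) (by omega), digitSq]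
    · simp only [h10, if_false]
      rw [ih (m / 10) _ (by omega), digitSq_eq m]
      simp only [List.map_cons, List.sum_cons, sqDigit_digitChar (m % 10) (by omega)]
      ring

theorem loop_eq_digitSq (m : Nat) : ∀ acc : Int, numToSquaresLoop (m : Int) acc = digitSq m + acc := by
  induction m using Nat.strong_induction_on with
  | _ m ih =>
    intro acc
    rw [numToSquaresLoop.eq_def]
    by_cases hm : m = 0
    · subst hm; simp [digitSq]
    · simp only [show (0:Int) < (m:Int) from by omega, if_true]
      have hfd : PySem.Int.floordiv (m : Int) 10 = ((m / 10 : Nat) : Int) := by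
        simp only [PySem.Int.floordiv, Int.fdiv_eq_ediv,
          show ((0:Int) ≤ 10 ∨ (10:Int) ∣ (m:Int)) from Or.inl (by omega), if_true]
        omega
      have hmd : PySem.Int.mod (m : Int) 10 = ((m % 10 : Nat) : Int) := by
        simp only [PySem.Int.mod, Int.fmod_eq_emod]; omega
      rw [hfd, hmd, ih (m / 10) (by omega), digitSq_eq m]
      ring

-- ===== VERDICT (by name: the statement is the Claim_ definition above) =====
theorem numToSquares_spec : Claim_equal_numToSquares := by
  intro n _
  unfold Spec_numToSquares numToSquares numToSquares_alt
  by_cases hn : n ≤ 0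
  · rw [numToSquaresLoop.eq_def]
    simp [hn, show ¬ 0 < n from by omega]
  · have h0 : ¬ n < 0 := by omega
    simp only [if_neg hn]
    have hcast : n = ((n.toNat : Int)) := by omega
    rw [hcast, loop_eq_digitSq n.toNat 0]
    rw [PySem.Int.toList_toStr]
    simp only [PySem.Int.toChars, if_neg (by omega : ¬ ((n.toNat : Int)) < 0), Int.toNat_natCast]
    rw [Nat.toDigits, toDigitsCore_sum (n.toNat + 1) n.toNat [] (by omega)]
    simp
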